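-- pv_equiv track=rewrite | github.com/udaybindal01/QA-MRL | data/build_real_data.py | _find_best_passage
-- ===== SOURCE A (Python) =====
-- from typing import Dict, List, Optional
--
-- def _find_best_passage(query_kw: set, corpus_kw: List[set], min_overlap: int = 3) -> Optional[int]:
--     """Find corpus passage with highest keyword overlap to query."""
--     best_idx, best_score = None, 0
--     for i, ckw in enumerate(corpus_kw):
--         overlap = len(query_kw & ckw)
--         if overlap > best_score and overlap >= min_overlap:
--             best_score = overlap
--             best_idx = i
--     return best_idx
-- ===== SOURCE B (Python) =====
-- from typing import List, Optional
--
-- def _find_best_passage(query_kw: set, corpus_kw: List[set], min_overlap: int = 3) -> Optional[int]: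
--     """Find corpus passage with highest keyword overlap to query."""
--     scores = [len(query_kw & ckw) for ckw in corpus_kw]
--     if not scores:
--         return None
--     best = max(scores)
--     if best < min_overlap or best < 1:
--         return None
--     return scores.index(best)
-- ===== Notes on version B (the rewrite author's own statement) =====
-- stated objective: simpler
-- what changed: Replaces the single best-so-far tracking loop by a score list built with a comprehension followed by max() and first-index lookup, making the effective threshold max(min_overlap, 1) explicit.
import Mathlib
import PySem

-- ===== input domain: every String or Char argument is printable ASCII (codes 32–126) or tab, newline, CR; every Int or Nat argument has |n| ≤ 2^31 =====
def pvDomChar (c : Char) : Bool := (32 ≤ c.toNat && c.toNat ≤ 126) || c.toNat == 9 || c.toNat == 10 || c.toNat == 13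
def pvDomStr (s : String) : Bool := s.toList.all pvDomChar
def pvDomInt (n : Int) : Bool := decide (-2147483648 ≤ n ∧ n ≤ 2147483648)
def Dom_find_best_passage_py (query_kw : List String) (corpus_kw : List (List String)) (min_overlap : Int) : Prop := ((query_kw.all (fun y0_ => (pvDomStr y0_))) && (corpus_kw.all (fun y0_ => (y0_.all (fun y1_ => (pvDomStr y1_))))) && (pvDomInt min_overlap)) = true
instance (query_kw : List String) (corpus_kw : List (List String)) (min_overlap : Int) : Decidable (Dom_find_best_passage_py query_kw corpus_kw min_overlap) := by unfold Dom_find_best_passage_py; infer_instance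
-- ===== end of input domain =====

-- B replaces A's best-so-far tracking loop by a score list (comprehension) + max() + first-index
-- lookup, making the effective threshold max(min_overlap, 1) explicit; same return value everywhere.

-- shared primitive: len(query_kw & ckw), the set-intersection size both Pythons compute
def pvOverlap (query_kw : List String) (ckw : List String) : Int :=
  PySem.Set.len (PySem.Set.inter (PySem.Set.ofList query_kw) (PySem.Set.ofList ckw))

-- ===== PORT A =====
def find_best_passage_py (query_kw : List String) (corpus_kw : List (List String)) (min_overlap : Int) : Option Int :=
  (List.foldl
    (fun (st : Option Int × Int) (p : Int × List String) =>
      let overlap := pvOverlap query_kw p.2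
      if st.2 < overlap ∧ min_overlap ≤ overlap then (some p.1, overlap) else st)
    (none, 0) (PySem.List.enumerate corpus_kw)).1

-- ===== PORT B =====
def find_best_passage_py_alt (query_kw : List String) (corpus_kw : List (List String)) (min_overlap : Int) : Option Int :=
  let scores := corpus_kw.map (fun ckw => pvOverlap query_kw ckw)
  match PySem.List.max? scores (fun y => y) with
  | none => none
  | some best =>
    if best < min_overlap ∨ best < 1 then none
    else (PySem.List.index? scores best).map (fun k => Int.ofNat k)

-- ===== PRECONDITION & SPEC =====
def Spec_find_best_passage_py (query_kw : List String) (corpus_kw : List (List String)) (min_overlap : Int) (out : Option Int) : Prop := out = find_best_passage_py_alt query_kw corpus_kw min_overlap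
instance (query_kw : List String) (corpus_kw : List (List String)) (min_overlap : Int) (out : Option Int) : Decidable (Spec_find_best_passage_py query_kw corpus_kw min_overlap out) := by unfold Spec_find_best_passage_py; infer_instance

-- ===== CLAIM (what is proved, stated in full; the proofs are below) =====
def Claim_equal_find_best_passage_py : Prop := ∀ (query_kw : List String) (corpus_kw : List (List String)) (min_overlap : Int), Dom_find_best_passage_py query_kw corpus_kw min_overlap → Spec_find_best_passage_py query_kw corpus_kw min_overlap (find_best_passage_py query_kw corpus_kw min_overlap)

-- ===== LEMMAS AND PROOFS =====

-- If no remaining passage can beat the current state, A's loop leaves the state unchanged.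
lemma fbp_loop_stop (q : List String) (m : Int) (l : List (List String)) :
    ∀ (k : Int) (bi : Option Int) (bs : Int),
      (∀ x ∈ l, ¬ (bs < pvOverlap q x ∧ m ≤ pvOverlap q x)) →
      List.foldl
        (fun (st : Option Int × Int) (p : Int × List String) =>
          let overlap := pvOverlap q p.2
          if st.2 < overlap ∧ m ≤ overlap then (some p.1, overlap) else st)
        (bi, bs) (PySem.List.enumerate l k) = (bi, bs) := by
  induction l with
  | nil => intro k bi bs _; simp [PySem.List.enumerate]
  | cons x xs ih =>
    intro k bi bs h
    rw [PySem.List.enumerate_cons]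
    simp only [List.foldl_cons]
    rw [if_neg (h x (List.mem_cons_self))]
    exact ih (k + 1) bi bs (fun y hy => h y (List.mem_cons_of_mem _ hy))

-- A's loop, started below the maximum score M (which meets the threshold), ends at the
-- first index achieving M, with score M.
lemma fbp_loop_max (q : List String) (m : Int) (l : List (List String)) :
    ∀ (k : Int) (bi : Option Int) (bs M : Int),
      bs < M → m ≤ M → M ∈ l.map (fun ckw => pvOverlap q ckw) →
      (∀ x ∈ l.map (fun ckw => pvOverlap q ckw), x ≤ M) →
      List.foldl
        (fun (st : Option Int × Int) (p : Int × List String) =>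
          let overlap := pvOverlap q p.2
          if st.2 < overlap ∧ m ≤ overlap then (some p.1, overlap) else st)
        (bi, bs) (PySem.List.enumerate l k)
      = (some (k + (((l.map (fun ckw => pvOverlap q ckw)).idxOf M : Nat) : Int)), M) := by
  induction l with
  | nil => intro k bi bs M _ _ hmem _; simp at hmem
  | cons x xs ih =>
    intro k bi bs M hbs hm hmem hmax
    rw [PySem.List.enumerate_cons]
    simp only [List.foldl_cons]
    by_cases hx : pvOverlap q x = M
    · rw [if_pos (by simpa [hx] using And.intro hbs hm)]
      rw [fbp_loop_stop q m xs (k + 1) (some k) (pvOverlap q x)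
        (fun y hy hcontra => by
          have hle : pvOverlap q y ≤ M :=
            hmax _ (by simp only [List.map_cons]; exact List.mem_cons_of_mem _ (List.mem_map_of_mem hy))
          rw [hx] at hcontra; omega)]
      simp [List.map_cons, hx, List.idxOf_cons_self]
    · have hxm : M ∈ xs.map (fun ckw => pvOverlap q ckw) := by
        simp only [List.map_cons] at hmem
        rcases List.mem_cons.mp hmem with h | h
        · exact absurd h.symm hx
        · exact h
      have hmax' : ∀ y ∈ xs.map (fun ckw => pvOverlap q ckw), y ≤ M :=
        fun y hy => hmax _ (by simp only [List.map_cons]; exact List.mem_cons_of_mem _ hy)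
      have hxlt : pvOverlap q x < M :=
        lt_of_le_of_ne (hmax _ (by simp [List.map_cons])) hx
      have hidx : ((x :: xs).map (fun ckw => pvOverlap q ckw)).idxOf M
          = (xs.map (fun ckw => pvOverlap q ckw)).idxOf M + 1 := by
        simp only [List.map_cons]
        exact List.idxOf_cons_ne _ hx
      by_cases ht : bs < pvOverlap q x ∧ m ≤ pvOverlap q x
      · rw [if_pos ht]
        rw [ih (k + 1) (some k) (pvOverlap q x) M hxlt hm hxm hmax']
        rw [hidx]; push_cast; ring_nf
      · rw [if_neg ht]
        rw [ih (k + 1) bi bs M hbs hm hxm hmax']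
        rw [hidx]; push_cast; ring_nf

lemma idxOf?_of_mem {α : Type} [DecidableEq α] {l : List α} {a : α} (h : a ∈ l) :
    List.idxOf? a l = some (l.idxOf a) := by
  induction l with
  | nil => simp at h
  | cons x xs ih =>
    rw [List.idxOf?_cons, List.idxOf_cons]
    by_cases hx : x = a
    · simp [hx]
    · have hb : (x == a) = false := beq_false_of_ne hx
      have ha : a ∈ xs := by
        rcases List.mem_cons.mp h with h' | h'
        · exact absurd h'.symm hx
        · exact h'
      simp [hb, ih ha]

-- ===== VERDICT (by name: the statement is the Claim_ definition above) =====
theorem find_best_passage_py_spec : Claim_equal_find_best_passage_py := by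
  intro q c m _
  unfold Spec_find_best_passage_py find_best_passage_py find_best_passage_py_alt
  cases c with
  | nil => simp [PySem.List.enumerate, PySem.List.max?]
  | cons c0 cs =>
    have hmax? : PySem.List.max? ((c0 :: cs).map (fun ckw => pvOverlap q ckw)) (fun y => y)
        = some (List.foldl max (pvOverlap q c0) (cs.map (fun ckw => pvOverlap q ckw))) := by
      simp only [List.map_cons]; rw [PySem.List.max?_id_cons]
    set M : Int := List.foldl max (pvOverlap q c0) (cs.map (fun ckw => pvOverlap q ckw)) with hM
    have hmem : M ∈ (c0 :: cs).map (fun ckw => pvOverlap q ckw) := PySem.List.max?_mem hmax?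
    have hismax : ∀ y ∈ (c0 :: cs).map (fun ckw => pvOverlap q ckw), y ≤ M :=
      fun y hy => PySem.List.max?_isMax hmax? y hy
    show _ = match PySem.List.max? ((c0 :: cs).map (fun ckw => pvOverlap q ckw)) (fun y => y) with
      | none => none
      | some best =>
        if best < m ∨ best < 1 then none
        else (PySem.List.index? ((c0 :: cs).map (fun ckw => pvOverlap q ckw)) best).map
          (fun k => Int.ofNat k)
    rw [hmax?]
    show _ = if M < m ∨ M < 1 then none
      else (PySem.List.index? ((c0 :: cs).map (fun ckw => pvOverlap q ckw)) M).map
        (fun k => Int.ofNat k)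
    by_cases hlow : M < m ∨ M < 1
    · rw [if_pos hlow]
      rw [fbp_loop_stop q m (c0 :: cs) 0 none 0
        (fun x hx hcontra => by
          have hle : pvOverlap q x ≤ M := hismax _ (List.mem_map_of_mem hx)
          omega)]
    · rw [if_neg hlow]
      push Not at hlow
      rw [fbp_loop_max q m (c0 :: cs) 0 none 0 M (by omega) hlow.1 hmem hismax]
      rw [PySem.List.index?_eq_idxOf?, idxOf?_of_mem hmem]
      simp
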